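-- pv_equiv track=rewrite | github.com/Ethara-Ai/pzprjs | games/shabid/verify_uniqueness.py | decode_number_string
-- ===== SOURCE A (Python) =====
-- def decode_number_string(num_str, rows, cols):
--     """
--     Decode pzpr number16 encoding.
--     Returns dict of (row, col) -> value for clue cells.
--
--     Format: numbers 0-9a-f are literal hex values (but we use 1-6).
--     Letters g-z represent gaps: g=1 empty, h=2 empties, ..., z=16 empties.
--     """
--     clues = {}
--     cell_idx = 0
--     total_cells = rows * cols
--     i = 0
--
--     while i < len(num_str) and cell_idx < total_cells:
--         ch = num_str[i]
--         if ch in '0123456789abcdef':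
--             val = int(ch, 16)
--             if val > 0:
--                 r = cell_idx // cols
--                 c = cell_idx % cols
--                 clues[(r, c)] = val
--             cell_idx += 1
--         elif 'g' <= ch <= 'z':
--             # Gap: skip (ord(ch) - ord('f')) cells
--             skip = ord(ch) - ord('f')
--             cell_idx += skip
--         i += 1
--
--     return clues
-- ===== SOURCE B (Python) =====
-- def decode_number_string(num_str, rows, cols):
--     """Decode pzpr number16 encoding: first expand num_str into a flat list of
--     cell values (hex chars literal, gap chars g-z emit runs of zeros), capped at
--     total_cells; then scan the list and record every positive value as a clue."""
--     total_cells = rows * cols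
--     cells = []
--     for ch in num_str:
--         if len(cells) >= total_cells:
--             break
--         if ch in '0123456789abcdef':
--             cells.append(int(ch, 16))
--         elif 'g' <= ch <= 'z':
--             cells.extend([0] * (ord(ch) - ord('f')))
--     clues = {}
--     for idx, v in enumerate(cells):
--         if v > 0:
--             clues[divmod(idx, cols)] = v
--     return clues
-- ===== Notes on version B (the rewrite author's own statement) =====
-- stated objective: alternative
-- what changed: A's single fused while-loop that parses characters and emits clues in one pass is replaced by a two-phase decomposition: first expand the string into a flat list of cell values (hex chars literal, gap chars as runs of zeros, capped at total_cells), then scan that list with enumerate and record every positive value.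
import Mathlib
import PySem

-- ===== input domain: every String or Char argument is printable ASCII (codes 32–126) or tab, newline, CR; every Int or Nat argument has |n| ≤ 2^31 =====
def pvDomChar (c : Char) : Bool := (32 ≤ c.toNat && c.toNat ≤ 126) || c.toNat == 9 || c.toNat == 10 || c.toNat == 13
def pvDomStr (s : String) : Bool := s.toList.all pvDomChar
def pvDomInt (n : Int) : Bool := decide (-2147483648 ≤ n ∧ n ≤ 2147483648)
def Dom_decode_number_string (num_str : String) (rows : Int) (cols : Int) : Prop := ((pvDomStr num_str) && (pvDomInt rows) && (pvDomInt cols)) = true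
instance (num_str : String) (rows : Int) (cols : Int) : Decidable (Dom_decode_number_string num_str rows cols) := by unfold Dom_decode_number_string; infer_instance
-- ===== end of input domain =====

-- B replaces A's fused parse-and-emit while-loop by a two-phase decomposition
-- (expand the string into a flat list of cell values, then scan it for clues);
-- same cost, chosen for the plainer structure (objective: alternative).


-- ===== PORT A =====
-- ch in '0123456789abcdef'
def pvIsHex (c : Char) : Bool := "0123456789abcdef".toList.contains c
-- int(ch, 16) for a lowercase hex digit
def pvHexVal (c : Char) : Int := if c.isDigit then ((c.toNat : Int) - 48) else ((c.toNat : Int) - 87)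
-- 'g' <= ch <= 'z'
def pvIsGap (c : Char) : Bool := 103 ≤ c.toNat && c.toNat ≤ 122

-- A's while loop: state (cell_idx, clues); i advances one char per iteration,
-- so the loop is structural recursion on the remaining characters.
def pvALoop (total cols : Int) : List Char → Int → PySem.Dict (Int × Int) Int → PySem.Dict (Int × Int) Int
  | [], _, clues => clues
  | ch :: rest, cell_idx, clues =>
    if cell_idx < total then
      if pvIsHex ch then
        pvALoop total cols rest (cell_idx + 1)
          (if pvHexVal ch > 0 then clues.insert (PySem.Int.floordiv cell_idx cols, PySem.Int.mod cell_idx cols) (pvHexVal ch) else clues)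
      else if pvIsGap ch then
        pvALoop total cols rest (cell_idx + ((ch.toNat : Int) - 102)) clues
      else
        pvALoop total cols rest cell_idx clues
    else clues

def decode_number_string (num_str : String) (rows : Int) (cols : Int) : List (Int × Int × Int) :=
  (pvALoop (rows * cols) cols num_str.toList 0 PySem.Dict.empty).items.map (fun p => (p.1.1, p.1.2, p.2))

-- ===== PORT B =====
-- phase 1: expand the string into the flat list of cell values, capped at total
def pvBBuild (total : Int) : List Char → List Int → List Int
  | [], cells => cells
  | ch :: rest, cells =>
    if (cells.length : Int) ≥ total then cells
    else if pvIsHex ch then pvBBuild total rest (cells ++ [pvHexVal ch])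
    else if pvIsGap ch then pvBBuild total rest (cells ++ List.replicate (ch.toNat - 102) 0)
    else pvBBuild total rest cells

-- phase 2: for idx, v in enumerate(cells): if v > 0: clues[divmod(idx, cols)] = v
def pvBScan (cols : Int) (cells : List Int) : PySem.Dict (Int × Int) Int :=
  (PySem.List.enumerate cells 0).foldl
    (fun clues p => if p.2 > 0 then clues.insert (PySem.Int.floordiv p.1 cols, PySem.Int.mod p.1 cols) p.2 else clues)
    PySem.Dict.empty

def decode_number_string_alt (num_str : String) (rows : Int) (cols : Int) : List (Int × Int × Int) :=
  (pvBScan cols (pvBBuild (rows * cols) num_str.toList [])).items.map (fun p => (p.1.1, p.1.2, p.2))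

-- ===== PRECONDITION & SPEC =====
def Spec_decode_number_string (num_str : String) (rows : Int) (cols : Int) (out : List (Int × Int × Int)) : Prop := out = decode_number_string_alt num_str rows cols
instance (num_str : String) (rows : Int) (cols : Int) (out : List (Int × Int × Int)) : Decidable (Spec_decode_number_string num_str rows cols out) := by unfold Spec_decode_number_string; infer_instance

-- ===== CLAIM (what is proved, stated in full; the proofs are below) =====
def Claim_equal_decode_number_string : Prop := ∀ (num_str : String) (rows : Int) (cols : Int), Dom_decode_number_string num_str rows cols → Spec_decode_number_string num_str rows cols (decode_number_string num_str rows cols)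

-- ===== LEMMAS AND PROOFS =====

-- generalized phase 2: scan with an arbitrary start index and accumulator
def pvF (cols : Int) (cells : List Int) (s : Int) (d : PySem.Dict (Int × Int) Int) : PySem.Dict (Int × Int) Int :=
  (PySem.List.enumerate cells s).foldl
    (fun clues p => if p.2 > 0 then clues.insert (PySem.Int.floordiv p.1 cols, PySem.Int.mod p.1 cols) p.2 else clues) d

theorem pvBScan_eq_pvF (cols : Int) (cells : List Int) : pvBScan cols cells = pvF cols cells 0 PySem.Dict.empty := rfl

theorem pvF_append (cols : Int) (xs ys : List Int) (s : Int) (d : PySem.Dict (Int × Int) Int) :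
    pvF cols (xs ++ ys) s d = pvF cols ys (s + xs.length) (pvF cols xs s d) := by
  simp [pvF, PySem.List.enumerate_append, List.foldl_append]

theorem pvF_replicate_zero (cols : Int) (k : Nat) (s : Int) (d : PySem.Dict (Int × Int) Int) :
    pvF cols (List.replicate k 0) s d = d := by
  induction k generalizing s d with
  | zero => simp [pvF]
  | succ n ih =>
    simp only [List.replicate_succ, pvF, PySem.List.enumerate_cons, List.foldl_cons]
    simpa [pvF] using ih (s + 1) d

theorem pvF_singleton (cols : Int) (v s : Int) (d : PySem.Dict (Int × Int) Int) :
    pvF cols [v] s d =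
      (if v > 0 then d.insert (PySem.Int.floordiv s cols, PySem.Int.mod s cols) v else d) := by
  simp [pvF, PySem.List.enumerate_cons]

-- main invariant: A's fused loop from state (|cells|, scan of cells) equals
-- scanning whatever pvBBuild extends cells to
theorem pvMain (total cols : Int) (cs : List Char) :
    ∀ (cells : List Int),
      pvALoop total cols cs (cells.length : Int) (pvF cols cells 0 PySem.Dict.empty)
        = pvF cols (pvBBuild total cs cells) 0 PySem.Dict.empty := by
  induction cs with
  | nil => intro cells; simp [pvALoop, pvBBuild]
  | cons ch rest ih =>
    intro cells
    rw [pvALoop, pvBBuild]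
    by_cases hlt : (cells.length : Int) < total
    · rw [if_pos hlt, if_neg (show ¬ ((cells.length : Int) ≥ total) by omega)]
      by_cases hhex : pvIsHex ch = true
      · rw [if_pos hhex, if_pos hhex]
        have h1 : (if pvHexVal ch > 0 then
              (pvF cols cells 0 PySem.Dict.empty).insert
                (PySem.Int.floordiv (cells.length : Int) cols, PySem.Int.mod (cells.length : Int) cols) (pvHexVal ch)
            else pvF cols cells 0 PySem.Dict.empty)
            = pvF cols (cells ++ [pvHexVal ch]) 0 PySem.Dict.empty := by
          rw [pvF_append, pvF_singleton]; simp
        have h2 : (cells.length : Int) + 1 = ((cells ++ [pvHexVal ch]).length : Int) := by simp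
        rw [h1, h2, ih]
      · rw [if_neg hhex, if_neg hhex]
        by_cases hgap : pvIsGap ch = true
        · rw [if_pos hgap, if_pos hgap]
          have h2 : pvF cols cells 0 PySem.Dict.empty
              = pvF cols (cells ++ List.replicate (ch.toNat - 102) 0) 0 PySem.Dict.empty := by
            rw [pvF_append, pvF_replicate_zero]
          have h3 : (cells.length : Int) + ((ch.toNat : Int) - 102)
              = ((cells ++ List.replicate (ch.toNat - 102) 0).length : Int) := by
            have : 103 ≤ ch.toNat := by simp [pvIsGap] at hgap; omega
            simp [List.length_append]; omega
          rw [h2, h3, ih]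
        · rw [if_neg hgap, if_neg hgap, ih]
    · rw [if_neg hlt, if_pos (show (cells.length : Int) ≥ total by omega)]

-- ===== VERDICT (by name: the statement is the Claim_ definition above) =====
theorem decode_number_string_spec : Claim_equal_decode_number_string := by
  intro num_str rows cols _
  unfold Spec_decode_number_string decode_number_string decode_number_string_alt
  have h := pvMain (rows * cols) cols num_str.toList []
  simp only [List.length_nil, Nat.cast_zero] at h
  rw [show (pvF cols ([] : List Int) 0 PySem.Dict.empty) = PySem.Dict.empty from rfl] at h
  rw [pvBScan_eq_pvF, h]
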